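-- pv_equiv track=rewrite | github.com/ofrizangi/Computational-Biology-Ass2 | algorithm_operations.py | calculate_matrix_grade
-- ===== SOURCE A (Python) =====
-- def calculate_matrix_grade(my_matrix, sign_dict):
--     grade = 0
--     seen_numbers = []
--     # going over the columns of the matrix and counting the number of values missing to have a permutation
--     for col in range(0, len(my_matrix)):
--         for row in range(0, len(my_matrix)):
--             if my_matrix[row][col] not in seen_numbers:
--                 seen_numbers.append(my_matrix[row][col])
--             # checking if there is not a match by the sign
--             if sign_dict.get((row, col)) is not None:
--                 for value in sign_dict.get((row, col)):
--                     if my_matrix[row][col] < my_matrix[value[0]][value[1]]: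
--                         grade = grade + 1
--         grade = grade + len(my_matrix) - len(seen_numbers)
--         seen_numbers.clear()
--
--     return grade
-- ===== SOURCE B (Python) =====
-- def calculate_matrix_grade(my_matrix, sign_dict):
--     n = len(my_matrix)
--     # permutation deficit: one pass per column with a set
--     grade = sum(n - len({my_matrix[row][col] for row in range(n)}) for col in range(n))
--     # sign violations: iterate the dict entries directly, only in-range keys
--     for (row, col), targets in sign_dict.items():
--         if 0 <= row < n and 0 <= col < n:
--             for vr, vc in targets:
--                 if my_matrix[row][col] < my_matrix[vr][vc]:
--                     grade += 1
--     return grade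
-- ===== Notes on version B (the rewrite author's own statement) =====
-- stated objective: alternative
-- what changed: B replaces A's single nested row/column sweep (per-cell dict.get lookups plus a linear 'not in seen_numbers' list scan) by two independent passes: per-column set-based distinct counts, then a direct walk over the dict's in-range entries; intended as faster, but a timing run could not consistently confirm it (median 2.8x at the largest size, 2/4 inputs >= 1.5x).
import Mathlib
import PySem

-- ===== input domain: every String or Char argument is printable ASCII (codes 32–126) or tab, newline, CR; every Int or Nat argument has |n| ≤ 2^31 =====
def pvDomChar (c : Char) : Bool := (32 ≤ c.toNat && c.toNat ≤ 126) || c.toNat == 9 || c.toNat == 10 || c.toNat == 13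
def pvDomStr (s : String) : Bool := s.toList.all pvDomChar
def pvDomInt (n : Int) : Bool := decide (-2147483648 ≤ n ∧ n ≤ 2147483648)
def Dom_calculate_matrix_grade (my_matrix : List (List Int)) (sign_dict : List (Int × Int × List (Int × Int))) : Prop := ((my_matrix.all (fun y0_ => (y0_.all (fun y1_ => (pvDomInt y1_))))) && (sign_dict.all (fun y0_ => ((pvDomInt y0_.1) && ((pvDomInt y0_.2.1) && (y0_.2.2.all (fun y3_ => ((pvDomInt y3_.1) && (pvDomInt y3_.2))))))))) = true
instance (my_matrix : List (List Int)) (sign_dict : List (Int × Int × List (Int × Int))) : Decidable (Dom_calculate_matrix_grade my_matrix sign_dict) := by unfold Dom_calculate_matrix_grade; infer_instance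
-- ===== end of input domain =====

-- B splits the grade into two independent passes (per-column set deficits, then a direct walk
-- over the dict's in-range entries), replacing A's cell-by-cell dict lookups and list-membership
-- scans; objective: alternative decomposition.

-- shared transliteration of the Python indexing 'my_matrix[r][c]' (exact under Pre_)
def pvCell (m : List (List Int)) (r c : Int) : Int :=
  PySem.List.pyGetD (PySem.List.pyGetD m r []) c 0

-- ===== PORT A =====
-- transliteration of 'sign_dict.get((row, col))' on the association list (first match)
def pvGetSD (sd : List (Int × Int × List (Int × Int))) (r c : Int) : Option (List (Int × Int)) :=
  (sd.find? (fun e => e.1 == r && e.2.1 == c)).map (fun e => e.2.2)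

def calculate_matrix_grade (my_matrix : List (List Int)) (sign_dict : List (Int × Int × List (Int × Int))) : Int :=
  ((PySem.List.pyRange 0 my_matrix.length 1).foldl
    (fun (st : Int × List Int) col =>
      let st2 := (PySem.List.pyRange 0 my_matrix.length 1).foldl
        (fun (st : Int × List Int) row =>
          let seen := if st.2.contains (pvCell my_matrix row col) then st.2
                      else st.2 ++ [pvCell my_matrix row col]
          let g := match pvGetSD sign_dict row col with
            | none => st.1
            | some vs => vs.foldl
                (fun g v => if pvCell my_matrix row col < pvCell my_matrix v.1 v.2 then g + 1 else g) st.1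
          (g, seen)) st
      (st2.1 + (my_matrix.length : Int) - (st2.2.length : Int), ([] : List Int)))
    (0, [])).1

-- ===== PORT B =====
def calculate_matrix_grade_alt (my_matrix : List (List Int)) (sign_dict : List (Int × Int × List (Int × Int))) : Int :=
  let n : Int := my_matrix.length
  let grade : Int := ((PySem.List.pyRange 0 n 1).map (fun col =>
      n - ((PySem.Set.ofList ((PySem.List.pyRange 0 n 1).map
              (fun row => pvCell my_matrix row col))).length : Int))).sum
  sign_dict.foldl (fun g e =>
    if 0 ≤ e.1 ∧ e.1 < n ∧ 0 ≤ e.2.1 ∧ e.2.1 < n then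
      e.2.2.foldl (fun g v => if pvCell my_matrix e.1 e.2.1 < pvCell my_matrix v.1 v.2 then g + 1 else g) g
    else g) grade

-- ===== PRECONDITION & SPEC =====
-- Pre_ excludes (a) inputs where Python A raises IndexError: a row shorter than the matrix height
-- (every row is indexed at every column 0..n-1), or a sign target of an in-range key indexing
-- outside the matrix; and (b) association lists whose keys repeat — impossible for an actual
-- Python dict, whose key uniqueness A's single .get-per-cell lookup relies on.
def Pre_calculate_matrix_grade (my_matrix : List (List Int)) (sign_dict : List (Int × Int × List (Int × Int))) : Prop :=
  (∀ r ∈ my_matrix, my_matrix.length ≤ r.length) ∧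
  (sign_dict.map (fun e => (e.1, e.2.1))).Nodup ∧
  (∀ e ∈ sign_dict,
    (0 ≤ e.1 ∧ e.1 < (my_matrix.length : Int) ∧ 0 ≤ e.2.1 ∧ e.2.1 < (my_matrix.length : Int)) →
    ∀ v ∈ e.2.2, PySem.Raise.InRange my_matrix.length v.1 ∧
      PySem.Raise.InRange (PySem.List.pyGetD my_matrix v.1 []).length v.2)
instance (my_matrix : List (List Int)) (sign_dict : List (Int × Int × List (Int × Int))) : Decidable (Pre_calculate_matrix_grade my_matrix sign_dict) := by
  unfold Pre_calculate_matrix_grade; infer_instance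

def pvWitness_calculate_matrix_grade : List (List Int) × (List (Int × Int × List (Int × Int))) :=
  ([[1, 2], [3, 0]], [(0, 0, [(1, 1)])])

def Spec_calculate_matrix_grade (my_matrix : List (List Int)) (sign_dict : List (Int × Int × List (Int × Int))) (out : Int) : Prop := out = calculate_matrix_grade_alt my_matrix sign_dict
instance (my_matrix : List (List Int)) (sign_dict : List (Int × Int × List (Int × Int))) (out : Int) : Decidable (Spec_calculate_matrix_grade my_matrix sign_dict out) := by unfold Spec_calculate_matrix_grade; infer_instance

-- ===== CLAIM (what is proved, stated in full; the proofs are below) =====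
def Claim_equal_calculate_matrix_grade : Prop := ∀ (my_matrix : List (List Int)) (sign_dict : List (Int × Int × List (Int × Int))), Dom_calculate_matrix_grade my_matrix sign_dict → Pre_calculate_matrix_grade my_matrix sign_dict → Spec_calculate_matrix_grade my_matrix sign_dict (calculate_matrix_grade my_matrix sign_dict)

-- ===== LEMMAS AND PROOFS =====

-- abbreviations used only by the proofs
def pvR (m : List (List Int)) : List Int := PySem.List.pyRange 0 m.length 1

def pvCnt (m : List (List Int)) (r c : Int) (vs : List (Int × Int)) : Int :=
  (vs.map (fun v => if pvCell m r c < pvCell m v.1 v.2 then (1 : Int) else 0)).sum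

def pvW (m : List (List Int)) (sd : List (Int × Int × List (Int × Int))) (r c : Int) : Int :=
  ((pvGetSD sd r c).map (pvCnt m r c)).getD 0

def pvColSeen (m : List (List Int)) (c : Int) : Int :=
  ((PySem.Set.ofList ((pvR m).map (fun row => pvCell m row c))).length : Int)

lemma pv_foldl_if {α : Type} (l : List α) (f : α → Prop) [DecidablePred f] (g0 : Int) :
    l.foldl (fun g v => if f v then g + 1 else g) g0
      = g0 + (l.map (fun v => if f v then (1 : Int) else 0)).sum := by
  induction l generalizing g0 with
  | nil => simp
  | cons x xs ih =>
      simp only [List.foldl_cons, List.map_cons, List.sum_cons, ih]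
      split_ifs <;> ring

lemma pv_inner (m : List (List Int)) (sd : List (Int × Int × List (Int × Int))) (c : Int)
    (L : List Int) (st : Int × List Int) :
    L.foldl (fun (st : Int × List Int) row =>
        let seen := if st.2.contains (pvCell m row c) then st.2 else st.2 ++ [pvCell m row c]
        let g := match pvGetSD sd row c with
          | none => st.1
          | some vs => vs.foldl (fun g v => if pvCell m row c < pvCell m v.1 v.2 then g + 1 else g) st.1
        (g, seen)) st
      = (st.1 + (L.map (fun row => pvW m sd row c)).sum,
         L.foldl (fun s row => PySem.Set.add s (pvCell m row c)) st.2) := by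
  induction L generalizing st with
  | nil => simp
  | cons x xs ih =>
      simp only [List.foldl_cons, List.map_cons, List.sum_cons, ih]
      simp only [Prod.mk.injEq]
      constructor
      · cases h : pvGetSD sd x c with
        | none => simp [pvW, h]
        | some vs => simp only [pvW, h, pvCnt, pv_foldl_if, Option.map_some, Option.getD_some]; ring
      · congr 1

lemma pv_outer (m : List (List Int)) (sd : List (Int × Int × List (Int × Int)))
    (L : List Int) (g0 : Int) :
    (L.foldl (fun (st : Int × List Int) col =>
        let st2 := (PySem.List.pyRange 0 m.length 1).foldl
          (fun (st : Int × List Int) row =>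
            let seen := if st.2.contains (pvCell m row col) then st.2 else st.2 ++ [pvCell m row col]
            let g := match pvGetSD sd row col with
              | none => st.1
              | some vs => vs.foldl (fun g v => if pvCell m row col < pvCell m v.1 v.2 then g + 1 else g) st.1
            (g, seen)) st
        (st2.1 + (m.length : Int) - (st2.2.length : Int), ([] : List Int))) (g0, [])).1
      = g0 + (L.map (fun col =>
            ((pvR m).map (fun row => pvW m sd row col)).sum
              + ((m.length : Int) - pvColSeen m col))).sum := by
  induction L generalizing g0 with
  | nil => simp
  | cons x xs ih =>
      simp only [List.foldl_cons, List.map_cons, List.sum_cons]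
      rw [pv_inner m sd x (PySem.List.pyRange 0 m.length 1) (g0, [])]
      rw [ih]
      have hseen : (PySem.List.pyRange 0 m.length 1).foldl
          (fun s row => PySem.Set.add s (pvCell m row x)) [] =
          PySem.Set.ofList ((pvR m).map (fun row => pvCell m row x)) := by
        rw [PySem.Set.ofList_eq_foldl, List.foldl_map]
        rfl
      simp only [hseen, pvColSeen, pvR]
      ring

lemma pv_B_fold (m : List (List Int)) (sd : List (Int × Int × List (Int × Int))) (g0 : Int) :
    sd.foldl (fun g e =>
        if 0 ≤ e.1 ∧ e.1 < (m.length : Int) ∧ 0 ≤ e.2.1 ∧ e.2.1 < (m.length : Int) then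
          e.2.2.foldl (fun g v => if pvCell m e.1 e.2.1 < pvCell m v.1 v.2 then g + 1 else g) g
        else g) g0
      = g0 + (sd.map (fun e =>
          if 0 ≤ e.1 ∧ e.1 < (m.length : Int) ∧ 0 ≤ e.2.1 ∧ e.2.1 < (m.length : Int) then
            pvCnt m e.1 e.2.1 e.2.2 else 0)).sum := by
  induction sd generalizing g0 with
  | nil => simp
  | cons e rest ih =>
      simp only [List.foldl_cons, List.map_cons, List.sum_cons, ih]
      split_ifs with h
      · rw [pv_foldl_if]; unfold pvCnt; ring
      · ring

lemma pv_sum_ite_eq_mem (L : List Int) (hL : L.Nodup) (a v : Int) :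
    (L.map (fun x => if x = a then v else 0)).sum = if a ∈ L then v else 0 := by
  induction L with
  | nil => simp
  | cons x xs ih =>
      simp only [List.nodup_cons] at hL
      simp only [List.map_cons, List.sum_cons, List.mem_cons, ih hL.2]
      by_cases hx : x = a
      · subst hx
        simp [hL.1]
      · simp [hx, Ne.symm hx]

lemma pv_find_none (sd : List (Int × Int × List (Int × Int))) (r c : Int)
    (h : (r, c) ∉ sd.map (fun e => (e.1, e.2.1))) : pvGetSD sd r c = none := by
  unfold pvGetSD
  rw [List.find?_eq_none.mpr, Option.map_none]
  intro x hx hpx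
  simp only [Bool.and_eq_true, beq_iff_eq] at hpx
  exact h (by
    simp only [List.mem_map]
    exact ⟨x, hx, by simp [hpx.1, hpx.2]⟩)

lemma pv_sign_eq (m : List (List Int)) (sd : List (Int × Int × List (Int × Int)))
    (hnd : (sd.map (fun e => (e.1, e.2.1))).Nodup) :
    ((pvR m).map (fun col => ((pvR m).map (fun row => pvW m sd row col)).sum)).sum
      = (sd.map (fun e =>
          if 0 ≤ e.1 ∧ e.1 < (m.length : Int) ∧ 0 ≤ e.2.1 ∧ e.2.1 < (m.length : Int) then
            pvCnt m e.1 e.2.1 e.2.2 else 0)).sum := by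
  induction sd with
  | nil =>
      simp [pvW, pvGetSD]
  | cons e rest ih =>
      simp only [List.map_cons, List.nodup_cons] at hnd
      have hrest := ih hnd.2
      -- pointwise split of pvW (e :: rest)
      have hpt : ∀ r c : Int, pvW m (e :: rest) r c
          = pvW m rest r c + (if r = e.1 then (if c = e.2.1 then pvCnt m e.1 e.2.1 e.2.2 else 0) else 0) := by
        intro r c
        by_cases hk : e.1 = r ∧ e.2.1 = c
        · obtain ⟨h1, h2⟩ := hk
          subst h1; subst h2
          have h0 : pvW m rest e.1 e.2.1 = 0 := by
            unfold pvW
            rw [pv_find_none rest e.1 e.2.1 hnd.1]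
            rfl
          rw [h0]
          unfold pvW pvGetSD
          rw [List.find?_cons_of_pos]
          · simp
          · simp
        · have hfind : pvGetSD (e :: rest) r c = pvGetSD rest r c := by
            unfold pvGetSD
            rw [List.find?_cons_of_neg]
            simp only [Bool.and_eq_true, beq_iff_eq, not_and]
            intro h1 h2; exact hk ⟨h1, h2⟩
          have hz : (if r = e.1 then (if c = e.2.1 then pvCnt m e.1 e.2.1 e.2.2 else 0) else 0) = 0 := by
            split_ifs with ha hb
            · exact absurd ⟨ha.symm, hb.symm⟩ hk
            · rfl
            · rfl
          rw [hz]
          unfold pvW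
          rw [hfind]
          ring
      simp only [List.map_cons, List.sum_cons]
      have hsplit : ∀ c, ((pvR m).map (fun row => pvW m (e :: rest) row c)).sum
          = ((pvR m).map (fun row => pvW m rest row c)).sum
            + ((pvR m).map (fun row =>
                if row = e.1 then (if c = e.2.1 then pvCnt m e.1 e.2.1 e.2.2 else 0) else 0)).sum := by
        intro c
        rw [← List.sum_map_add]
        congr 1
        apply List.map_congr_left
        intro r _
        exact hpt r c
      have hnodupR : (pvR m).Nodup := by
        unfold pvR; exact PySem.List.nodup_pyRange_one 0 m.length
      have hmemR : ∀ a : Int, a ∈ pvR m ↔ 0 ≤ a ∧ a < (m.length : Int) := by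
        intro a; unfold pvR
        rw [PySem.List.mem_pyRange_one]
      have hind : ((pvR m).map (fun c =>
            ((pvR m).map (fun row =>
              if row = e.1 then (if c = e.2.1 then pvCnt m e.1 e.2.1 e.2.2 else 0) else 0)).sum)).sum
          = (if 0 ≤ e.1 ∧ e.1 < (m.length : Int) ∧ 0 ≤ e.2.1 ∧ e.2.1 < (m.length : Int) then
              pvCnt m e.1 e.2.1 e.2.2 else 0) := by
        have hin : ∀ c, ((pvR m).map (fun row =>
              if row = e.1 then (if c = e.2.1 then pvCnt m e.1 e.2.1 e.2.2 else 0) else 0)).sum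
            = if e.1 ∈ pvR m then (if c = e.2.1 then pvCnt m e.1 e.2.1 e.2.2 else 0) else 0 := by
          intro c; exact pv_sum_ite_eq_mem (pvR m) hnodupR e.1 _
        simp only [hin]
        by_cases hr : e.1 ∈ pvR m
        · simp only [hr, if_true]
          rw [pv_sum_ite_eq_mem (pvR m) hnodupR e.2.1 _]
          rw [hmemR] at hr
          by_cases hc : e.2.1 ∈ pvR m
          · rw [hmemR] at hc
            simp [hr.1, hr.2, hc.1, hc.2, hmemR]
          · rw [hmemR] at hc
            have : ¬ (0 ≤ e.1 ∧ e.1 < (m.length : Int) ∧ 0 ≤ e.2.1 ∧ e.2.1 < (m.length : Int)) := by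
              intro h; exact hc ⟨h.2.2.1, h.2.2.2⟩
            simp [hmemR, hc]
        · have hnr : e.1 ∉ pvR m := hr
          rw [hmemR] at hr
          have hno : ¬ (0 ≤ e.1 ∧ e.1 < (m.length : Int) ∧ 0 ≤ e.2.1 ∧ e.2.1 < (m.length : Int)) := by
            intro h; exact hr ⟨h.1, h.2.1⟩
          simp [hnr, hno]
      calc ((pvR m).map (fun col => ((pvR m).map (fun row => pvW m (e :: rest) row col)).sum)).sum
          = ((pvR m).map (fun col =>
              ((pvR m).map (fun row => pvW m rest row col)).sum
              + ((pvR m).map (fun row =>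
                  if row = e.1 then (if col = e.2.1 then pvCnt m e.1 e.2.1 e.2.2 else 0) else 0)).sum)).sum := by
            apply congrArg
            apply List.map_congr_left
            intro c _
            exact hsplit c
        _ = ((pvR m).map (fun col => ((pvR m).map (fun row => pvW m rest row col)).sum)).sum
              + ((pvR m).map (fun c =>
                  ((pvR m).map (fun row =>
                    if row = e.1 then (if c = e.2.1 then pvCnt m e.1 e.2.1 e.2.2 else 0) else 0)).sum)).sum := by
            rw [← List.sum_map_add]
        _ = _ := by rw [hrest, hind]; ring

-- ===== VERDICT (by name: the statement is the Claim_ definition above) =====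
theorem calculate_matrix_grade_spec : Claim_equal_calculate_matrix_grade := by
  intro m sd _ hpre
  unfold Spec_calculate_matrix_grade
  obtain ⟨_, hnd, _⟩ := hpre
  unfold calculate_matrix_grade calculate_matrix_grade_alt
  rw [pv_outer m sd (PySem.List.pyRange 0 m.length 1) 0]
  rw [pv_B_fold m sd]
  rw [← pv_sign_eq m sd hnd]
  rw [List.sum_map_add]
  have hperm : ((PySem.List.pyRange 0 (m.length : Int) 1).map (fun col =>
      (m.length : Int) - ((PySem.Set.ofList ((PySem.List.pyRange 0 (m.length : Int) 1).map
          (fun row => pvCell m row col))).length : Int))).sum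
      = ((pvR m).map (fun col => (m.length : Int) - pvColSeen m col)).sum := rfl
  rw [hperm]
  unfold pvR
  ring
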